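-- pv_equiv track=rewrite | github.com/bownie/aoc-2022 | 6/6.py | get_position_of_first_different
-- ===== SOURCE A (Python) =====
-- def get_position_of_first_different(input_line):
--   # Variable window size
--   #
--   window_size = 14
--
--   match = []
--   for x in range(0, len(input_line)):
--     if len(match) == window_size:
--       match.pop(0)
--
--     match.append(input_line[x])
--
--     if len(set(match)) == window_size:
--       return x
--
--   return -1
-- ===== SOURCE B (Python) =====
-- def get_position_of_first_different(input_line):
--     # One-pass last-occurrence scan: `start` is the left end of the longest
--     # duplicate-free run ending at x; return x once that run reaches 14.
--     last = {}
--     start = 0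
--     for x, c in enumerate(input_line):
--         prev = last.get(c)
--         if prev is not None and prev >= start:
--             start = prev + 1
--         last[c] = x
--         if x - start >= 13:
--             return x
--     return -1
-- ===== Notes on version B (the rewrite author's own statement) =====
-- stated objective: faster
-- what changed: Replaces A's sliding 14-element list (pop/append plus rebuilding set(match) at every index) with a one-pass last-occurrence dictionary and a run-start pointer, doing O(1) work per character with no per-step set construction.
import Mathlib
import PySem

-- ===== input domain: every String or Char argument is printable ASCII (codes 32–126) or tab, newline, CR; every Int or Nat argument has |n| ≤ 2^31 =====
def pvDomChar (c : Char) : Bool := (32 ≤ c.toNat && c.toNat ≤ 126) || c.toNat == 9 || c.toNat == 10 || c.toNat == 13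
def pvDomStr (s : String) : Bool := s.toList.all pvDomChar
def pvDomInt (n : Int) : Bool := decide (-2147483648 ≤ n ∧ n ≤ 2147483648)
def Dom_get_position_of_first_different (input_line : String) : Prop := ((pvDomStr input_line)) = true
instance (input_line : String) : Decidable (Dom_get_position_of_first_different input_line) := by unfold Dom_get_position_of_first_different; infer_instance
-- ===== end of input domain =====

-- B replaces A's sliding 14-element list (pop/append + set() rebuild each step) by a one-pass
-- last-occurrence dictionary with a run start pointer; objective: faster (constant-factor, O(1) work per char).

-- ===== PORT A =====
-- loop of A: `for x in range(0, len(input_line))` with accumulator `match`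
def pvGoA (s : List Char) (m : List Char) (x : Nat) : Int :=
  if h : x < s.length then
    let m1 := if m.length = 14 then m.drop 1 else m      -- if len(match) == window_size: match.pop(0)
    let m2 := m1 ++ [s.getD x ' ']                        -- match.append(input_line[x]); x < len so getD is exact here
    if (PySem.Set.ofList m2).length = 14 then (x : Int)   -- if len(set(match)) == window_size: return x
    else pvGoA s m2 (x + 1)
  else -1
termination_by s.length - x

def get_position_of_first_different (input_line : String) : Int :=
  pvGoA input_line.toList [] 0

-- ===== PORT B =====
-- loop of B: `for x, c in enumerate(input_line)` with states `last` (dict) and `start`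
def pvGoB (last : PySem.Dict Char Int) (start : Int) (x : Int) : List Char → Int
  | [] => -1
  | c :: rest =>
    let start1 :=
      match last.get? c with                               -- prev = last.get(c)
      | some p => if start ≤ p then p + 1 else start       -- if prev is not None and prev >= start: start = prev + 1
      | none => start
    let last1 := last.insert c x                           -- last[c] = x
    if 13 ≤ x - start1 then x else pvGoB last1 start1 (x + 1) rest   -- if x - start >= 13: return x

def get_position_of_first_different_alt (input_line : String) : Int :=
  pvGoB PySem.Dict.empty 0 0 input_line.toList

-- ===== PRECONDITION & SPEC =====
def Spec_get_position_of_first_different (input_line : String) (out : Int) : Prop := out = get_position_of_first_different_alt input_line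
instance (input_line : String) (out : Int) : Decidable (Spec_get_position_of_first_different input_line out) := by unfold Spec_get_position_of_first_different; infer_instance

-- ===== CLAIM (what is proved, stated in full; the proofs are below) =====
def Claim_equal_get_position_of_first_different : Prop := ∀ (input_line : String), Dom_get_position_of_first_different input_line → Spec_get_position_of_first_different input_line (get_position_of_first_different input_line)

-- ===== LEMMAS AND PROOFS =====

-- len(set(l)) = number of distinct elements = length of Mathlib's dedup
lemma pv_setLen (W : List Char) : (PySem.Set.ofList W).length = W.dedup.length := by
  have h1 : (PySem.Set.ofList W).toFinset = W.toFinset := by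
    ext a; simp [List.mem_toFinset, PySem.Set.mem_ofList]
  rw [← List.toFinset_card_of_nodup (PySem.Set.nodup_ofList W), h1, List.card_toFinset]

-- A's return test, characterised: the window has 14 elements, all distinct
lemma pv_cond_iff (W : List Char) (hW : W.length ≤ 14) :
    ((PySem.Set.ofList W).length = 14) ↔ (W.length = 14 ∧ W.Nodup) := by
  rw [pv_setLen]
  constructor
  · intro h
    have hsub := List.dedup_sublist W
    have hlen : W.dedup.length ≤ W.length := hsub.length_le
    have hWl : W.length = 14 := by omega
    have heq : W.dedup = W := hsub.eq_of_length (by omega)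
    exact ⟨hWl, heq ▸ List.nodup_dedup W⟩
  · intro ⟨h1, h2⟩
    rw [List.dedup_eq_self.mpr h2]
    exact h1

lemma pv_nodup_drop_mono (l : List Char) {a b : Nat} (h : a ≤ b)
    (hn : (l.drop a).Nodup) : (l.drop b).Nodup := by
  have he : l.drop b = (l.drop a).drop (b - a) := by
    rw [List.drop_drop]; congr 1; omega
  rw [he]
  exact hn.sublist (List.drop_sublist _ _)

-- index characterisation of membership in a slice s[a:x]
lemma pv_mem_drop_take (s : List Char) (a x : Nat) (hx : x ≤ s.length) (c : Char) :
    c ∈ (s.take x).drop a ↔ ∃ k, a ≤ k ∧ k < x ∧ s.getD k ' ' = c := by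
  constructor
  · intro hm
    obtain ⟨i, hi, hgi⟩ := List.mem_iff_getElem.1 hm
    have hlen : ((s.take x).drop a).length = x - a := by
      simp [List.length_drop, List.length_take]; omega
    refine ⟨a + i, by omega, by omega, ?_⟩
    rw [List.getD_eq_getElem s ' ' (by omega)]
    rw [← hgi]
    simp [List.getElem_drop, List.getElem_take]
  · rintro ⟨k, hak, hkx, hgk⟩
    have hlen : ((s.take x).drop a).length = x - a := by
      simp [List.length_drop, List.length_take]; omega
    apply List.mem_iff_getElem.2
    refine ⟨k - a, by omega, ?_⟩
    rw [← hgk, List.getD_eq_getElem s ' ' (by omega)]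
    simp [List.getElem_drop, List.getElem_take]
    congr 1
    omega

-- invariant for B's `last` dict: it maps each char to its last occurrence before x
def pvQ (s : List Char) (x : Nat) (last : PySem.Dict Char Int) : Prop :=
  ∀ c : Char,
    (∀ p : Int, last.get? c = some p → ∃ pn : Nat, p = (pn : Int) ∧ pn < x ∧ s.getD pn ' ' = c ∧
        ∀ k : Nat, pn < k → k < x → s.getD k ' ' ≠ c) ∧
    (last.get? c = none → ∀ k : Nat, k < x → s.getD k ' ' ≠ c)

-- the two loop tests agree, given B's state is the minimal duplicate-free start
lemma pv_test_iff (s : List Char) (x stn' : Nat) (hx : x < s.length)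
    (I2 : ((s.take (x+1)).drop stn').Nodup)
    (I3 : stn' = 0 ∨ ¬ ((s.take (x+1)).drop (stn' - 1)).Nodup) :
    ((PySem.Set.ofList ((s.take (x+1)).drop (x+1-14))).length = 14) ↔ (stn' + 13 ≤ x) := by
  have hWlen : ((s.take (x+1)).drop (x+1-14)).length = (x+1) - (x+1-14) := by
    simp [List.length_drop, List.length_take]; omega
  rw [pv_cond_iff _ (by omega)]
  constructor
  · rintro ⟨hl, hnd⟩
    have h14 : 13 ≤ x := by omega
    by_contra hcon
    have h0 : stn' ≠ 0 := by omega
    rcases I3 with h | h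
    · exact h0 h
    · exact h (pv_nodup_drop_mono _ (by omega) hnd)
  · intro hle
    have h14 : 13 ≤ x := by omega
    refine ⟨by omega, ?_⟩
    exact pv_nodup_drop_mono _ (by omega) I2

lemma pv_nodup_concat {l : List Char} {c : Char} (h1 : l.Nodup) (h2 : c ∉ l) :
    (l ++ [c]).Nodup := by
  rw [List.nodup_append]
  refine ⟨h1, List.nodup_singleton c, ?_⟩
  intro a ha b hb
  rw [List.mem_singleton] at hb
  intro he
  exact h2 ((hb ▸ he) ▸ ha)

lemma pvLockstep (s : List Char) :
    ∀ (n x stn : Nat) (last : PySem.Dict Char Int),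
      s.length - x ≤ n →
      stn ≤ x →
      ((s.take x).drop stn).Nodup →
      (stn = 0 ∨ ¬ ((s.take x).drop (stn - 1)).Nodup) →
      pvQ s x last →
      pvGoA s ((s.take x).drop (x - 14)) x = pvGoB last (stn : Int) (x : Int) (s.drop x) := by
  intro n
  induction n with
  | zero =>
    intro x stn last hn _ _ _ _
    have hx : s.length ≤ x := by omega
    rw [pvGoA, dif_neg (by omega), List.drop_eq_nil_iff.mpr (by omega)]
    rfl
  | succ n ih =>
    intro x stn last hn hsx hnd hmin hQ
    by_cases hx : x < s.length
    · -- one loop step on each side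
      have hTlen : (s.take x).length = x := by simp [List.length_take]; omega
      have htake : s.take (x+1) = s.take x ++ [s.getD x ' '] := by
        rw [List.take_add_one, List.getElem?_eq_getElem hx, List.getD_eq_getElem s ' ' hx]
        rfl
      have hdropTake : ∀ st, st ≤ x →
          (s.take (x+1)).drop st = (s.take x).drop st ++ [s.getD x ' '] := by
        intro st hst
        rw [htake, List.drop_append, hTlen]
        have h0 : st - x = 0 := by omega
        rw [h0]
        rfl
      have hdropx : s.drop x = s.getD x ' ' :: s.drop (x+1) := by
        rw [List.drop_eq_getElem_cons hx, List.getD_eq_getElem s ' ' hx]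
      -- A's updated match list is the window s[x+1-14 : x+1]
      have hm2 : ((if ((s.take x).drop (x - 14)).length = 14
            then ((s.take x).drop (x - 14)).drop 1 else (s.take x).drop (x - 14)) ++ [s.getD x ' '])
          = (s.take (x+1)).drop (x+1-14) := by
        rw [hdropTake (x+1-14) (by omega)]
        by_cases h14 : 14 ≤ x
        · have hl14 : ((s.take x).drop (x - 14)).length = 14 := by
            simp [List.length_drop, hTlen]; omega
          rw [if_pos hl14, List.drop_drop]
          congr 2
          omega
        · have hl14 : ((s.take x).drop (x - 14)).length ≠ 14 := by
            simp [List.length_drop, hTlen]; omega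
          rw [if_neg hl14]
          congr 2
          omega
      rw [pvGoA, dif_pos hx]
      simp only [hm2]
      rw [hdropx]
      -- B side: compute the new start stn' as a Nat and establish the four invariants
      obtain ⟨hsome, hnone⟩ := hQ (s.getD x ' ')
      have key : ∃ stn' : Nat,
          ((match last.get? (s.getD x ' ') with
            | some p => if (stn : Int) ≤ p then p + 1 else (stn : Int)
            | none => (stn : Int)) = (stn' : Int)) ∧
          stn' ≤ x + 1 ∧
          ((s.take (x+1)).drop stn').Nodup ∧
          (stn' = 0 ∨ ¬ ((s.take (x+1)).drop (stn' - 1)).Nodup) := by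
        cases hget : last.get? (s.getD x ' ') with
        | none =>
          refine ⟨stn, by simp, by omega, ?_, ?_⟩
          · rw [hdropTake stn hsx]
            refine pv_nodup_concat hnd ?_
            intro hmem
            obtain ⟨k, _, hkx, hk⟩ := (pv_mem_drop_take s stn x (by omega) _).1 hmem
            exact hnone hget k hkx hk
          · rcases hmin with h0 | hbad
            · exact Or.inl h0
            · refine Or.inr ?_
              intro hnd'
              apply hbad
              rw [hdropTake (stn - 1) (by omega)] at hnd'
              exact (List.nodup_append.1 hnd').1
        | some p =>
          obtain ⟨pn, rfl, hpn, hspn, hmax⟩ := hsome p hget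
          by_cases hcmp : stn ≤ pn
          · refine ⟨pn + 1, ?_, by omega, ?_, ?_⟩
            · show (if (stn : Int) ≤ (pn : Int) then (pn : Int) + 1 else (stn : Int)) = ((pn + 1 : Nat) : Int)
              rw [if_pos (by exact_mod_cast hcmp)]
              push_cast
              ring
            · rw [hdropTake (pn+1) (by omega)]
              refine pv_nodup_concat (pv_nodup_drop_mono _ (by omega) hnd) ?_
              intro hmem
              obtain ⟨k, hk1, hkx, hk⟩ := (pv_mem_drop_take s (pn+1) x (by omega) _).1 hmem
              exact hmax k (by omega) hkx hk
            · refine Or.inr ?_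
              have hpx : (s.take (x+1)).drop (pn + 1 - 1) = s.getD pn ' ' :: ((s.take x).drop (pn+1) ++ [s.getD x ' ']) := by
                have h1 : pn + 1 - 1 = pn := by omega
                rw [h1, hdropTake pn (by omega)]
                have h2 : (s.take x).drop pn = s.getD pn ' ' :: (s.take x).drop (pn+1) := by
                  rw [List.drop_eq_getElem_cons (by omega : pn < (s.take x).length)]
                  congr 1
                  rw [List.getD_eq_getElem s ' ' (by omega)]
                  simp [List.getElem_take]
                rw [h2]
                rfl
              rw [hpx]
              intro hnd'
              have hc : s.getD pn ' ' ∉ (s.take x).drop (pn+1) ++ [s.getD x ' '] :=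
                (List.nodup_cons.1 hnd').1
              apply hc
              rw [hspn]
              exact List.mem_append_right _ (List.mem_singleton.2 rfl)
          · refine ⟨stn, ?_, by omega, ?_, ?_⟩
            · show (if (stn : Int) ≤ (pn : Int) then (pn : Int) + 1 else (stn : Int)) = (stn : Int)
              rw [if_neg (by exact_mod_cast hcmp)]
            · rw [hdropTake stn hsx]
              refine pv_nodup_concat hnd ?_
              intro hmem
              obtain ⟨k, hk1, hkx, hk⟩ := (pv_mem_drop_take s stn x (by omega) _).1 hmem
              exact hmax k (by omega) hkx hk
            · rcases hmin with h0 | hbad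
              · exact Or.inl h0
              · refine Or.inr ?_
                intro hnd'
                apply hbad
                rw [hdropTake (stn - 1) (by omega)] at hnd'
                exact (List.nodup_append.1 hnd').1
      obtain ⟨stn', hstart, I1, I2, I3⟩ := key
      -- Q is preserved by `last[c] = x`
      have hQ' : pvQ s (x+1) (last.insert (s.getD x ' ') (x : Int)) := by
        intro c'
        by_cases hcc : c' = s.getD x ' '
        · subst hcc
          constructor
          · intro p hp
            rw [PySem.Dict.get?_insert, if_pos rfl] at hp
            refine ⟨x, by simpa using hp.symm, by omega, rfl, ?_⟩
            intro k hk1 hk2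
            omega
          · intro hp
            rw [PySem.Dict.get?_insert, if_pos rfl] at hp
            exact absurd hp (by simp)
        · constructor
          · intro p hp
            rw [PySem.Dict.get?_insert, if_neg hcc] at hp
            obtain ⟨pn, hpeq, hpn, hspn, hmax'⟩ := (hQ c').1 p hp
            refine ⟨pn, hpeq, by omega, hspn, ?_⟩
            intro k hk1 hk2
            by_cases hkx : k = x
            · subst hkx
              intro hcontra
              exact hcc hcontra.symm
            · exact hmax' k hk1 (by omega)
          · intro hp
            rw [PySem.Dict.get?_insert, if_neg hcc] at hp
            intro k hk
            by_cases hkx : k = x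
            · subst hkx
              intro hcontra
              exact hcc hcontra.symm
            · exact (hQ c').2 hp k (by omega)
      -- align the two loop tests and finish
      show _ = pvGoB last (stn : Int) (x : Int) (s.getD x ' ' :: s.drop (x+1))
      rw [pvGoB]
      simp only [hstart]
      have htest := pv_test_iff s x stn' hx I2 I3
      by_cases ht : stn' + 13 ≤ x
      · rw [if_pos (htest.2 ht), if_pos (by omega)]
      · rw [if_neg (fun h => ht (htest.1 h)), if_neg (by omega)]
        have hrec := ih (x+1) stn' (last.insert (s.getD x ' ') (x : Int))
          (by omega) (by omega) I2 I3 hQ'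
        have hcast : ((x : Int) + 1) = ((x + 1 : Nat) : Int) := by push_cast; ring
        rw [hcast, hrec]
    · have hxe : s.length ≤ x := by omega
      rw [pvGoA, dif_neg (by omega), List.drop_eq_nil_iff.mpr (by omega)]
      rfl

-- ===== VERDICT (by name: the statement is the Claim_ definition above) =====
theorem get_position_of_first_different_spec : Claim_equal_get_position_of_first_different := by
  unfold Claim_equal_get_position_of_first_different
  intro input_line _
  unfold Spec_get_position_of_first_different
  unfold get_position_of_first_different get_position_of_first_different_alt
  have h := pvLockstep input_line.toList input_line.toList.length 0 0 PySem.Dict.empty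
    (by omega) (by omega) (by simp) (Or.inl rfl)
    (by
      intro c
      constructor
      · intro p hp
        rw [PySem.Dict.get?_empty] at hp
        exact absurd hp (by simp)
      · intro _ k hk
        omega)
  simpa using h
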